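-- pv_equiv track=rewrite | github.com/fmojica30/learning_python | Bottles.py | bottles_dp
-- ===== SOURCE A (Python) =====
-- def bottles_dp(v):
--   sv = []
--   bv = []
--   vol = 0
--   for i in range(len(v)):
--     if (i == 0):
--       sv.append(v[i]) #initializing the s(v) list
--       bv.append(i)
--     elif (i == 1): #initializing the s(v) list
--       if (len(sv) == 1):
--         if (v[i] > v[i - 1]):
--           sv.append(v[i])
--           bv.append(i)
--         else:
--           sv.append(sv[i - 1])
--           bv.append(-1)
--     else:
--       vol_add = v[i]
--       compare = [] #where to store the comparison values
--       compare_idx = [] #storage for comparison indices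
--       for j in range(len(sv) - 1):
--         vol_add += sv[j]
--         compare.append(vol_add)
--         vol_add -= sv[j]
--       item = compare.index(max(compare))
--       if (compare[item] > sv[i - 1]):
--         sv.append(compare[item])
--         bv.append(i)
--       else:
--         sv.append(sv[i - 1])
--         bv.append(-1)
--
--   return sv, bv
-- ===== SOURCE B (Python) =====
-- def bottles_dp(v):
--     n = len(v)
--     if n == 0:
--         return [], []
--     sv = [v[0]]
--     bv = [0]
--     if n >= 2:
--         if v[1] > v[0]:
--             sv.append(v[1]); bv.append(1)
--         else:
--             sv.append(v[0]); bv.append(-1)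
--         prev2, prev = v[0], sv[1]
--         for i in range(2, n):
--             cand = v[i] + prev2
--             if cand > prev:
--                 sv.append(cand); bv.append(i)
--             else:
--                 sv.append(prev); bv.append(-1)
--             prev2, prev = prev, sv[-1]
--     return sv, bv
-- ===== Notes on version B (the rewrite author's own statement) =====
-- stated objective: faster
-- what changed: A rebuilds a compare list over all previous sv values and rescans it with max() and list.index() at every iteration; B exploits that sv is nondecreasing (so the prefix maximum is always sv[i-2]) and does a single pass carrying only the last two sv values.
import Mathlib
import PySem

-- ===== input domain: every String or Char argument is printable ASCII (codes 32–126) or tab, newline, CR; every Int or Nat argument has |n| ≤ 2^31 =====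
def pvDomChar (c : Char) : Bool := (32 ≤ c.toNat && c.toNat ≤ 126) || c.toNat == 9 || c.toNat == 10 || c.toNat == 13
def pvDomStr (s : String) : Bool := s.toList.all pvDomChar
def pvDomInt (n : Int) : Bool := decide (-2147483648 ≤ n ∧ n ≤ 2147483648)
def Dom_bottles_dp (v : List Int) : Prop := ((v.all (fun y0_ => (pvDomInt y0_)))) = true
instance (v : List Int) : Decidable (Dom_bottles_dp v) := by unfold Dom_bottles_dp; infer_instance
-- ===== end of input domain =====

-- B replaces A's O(n^2) rescan (inner loop + max + index over all previous sv values) by an O(n)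
-- single pass carrying the last two sv values; return values are identical on all inputs.

-- ===== PORT A =====
-- one iteration of A's `for i in range(len(v))` loop; state = (sv, bv)
def aStep (v : List Int) (st : List Int × List Int) (i : Int) : List Int × List Int :=
  let sv := st.1
  let bv := st.2
  if i = 0 then
    (sv ++ [PySem.List.pyGetD v i 0], bv ++ [i])
  else if i = 1 then
    if sv.length = 1 then
      if PySem.List.pyGetD v i 0 > PySem.List.pyGetD v (i - 1) 0 then
        (sv ++ [PySem.List.pyGetD v i 0], bv ++ [i])
      else
        (sv ++ [PySem.List.pyGetD sv (i - 1) 0], bv ++ [-1])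
    else (sv, bv)
  else
    let x := PySem.List.pyGetD v i 0
    -- inner loop: vol_add += sv[j]; compare.append(vol_add); vol_add -= sv[j]
    let pr := (PySem.List.pyRange 0 ((sv.length : Int) - 1) 1).foldl
      (fun (st2 : Int × List Int) j =>
        ((st2.1 + PySem.List.pyGetD sv j 0) - PySem.List.pyGetD sv j 0,
         st2.2 ++ [st2.1 + PySem.List.pyGetD sv j 0])) (x, [])
    let compare := pr.2
    -- item = compare.index(max(compare)); Python raises on empty compare, which no reachable state produces
    let item : Int := ((PySem.List.index? compare ((PySem.List.max? compare (fun y => y)).getD 0)).getD 0 : Nat)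
    let citem := PySem.List.pyGetD compare item 0
    if citem > PySem.List.pyGetD sv (i - 1) 0 then
      (sv ++ [citem], bv ++ [i])
    else
      (sv ++ [PySem.List.pyGetD sv (i - 1) 0], bv ++ [-1])

def bottles_dp (v : List Int) : List Int × List Int :=
  (PySem.List.pyRange 0 (v.length : Int) 1).foldl (aStep v) ([], [])

-- ===== PORT B =====
-- one iteration of B's `for i in range(2, n)` loop; state = ((sv, bv), (prev2, prev))
def altStep (v : List Int) (st : (List Int × List Int) × (Int × Int)) (i : Int) :
    (List Int × List Int) × (Int × Int) :=
  let cand := PySem.List.pyGetD v i 0 + st.2.1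
  let prev := st.2.2
  if cand > prev then
    ((st.1.1 ++ [cand], st.1.2 ++ [i]), (prev, cand))
  else
    ((st.1.1 ++ [prev], st.1.2 ++ [-1]), (prev, prev))

def bottles_dp_alt (v : List Int) : List Int × List Int :=
  match v with
  | [] => ([], [])
  | [a] => ([a], [0])
  | a :: b :: _ =>
    let c := if b > a then b else a
    let b1 : Int := if b > a then 1 else -1
    ((PySem.List.pyRange 2 (v.length : Int) 1).foldl (altStep v) (([a, c], [0, b1]), (a, c))).1

-- ===== PRECONDITION & SPEC =====
def Spec_bottles_dp (v : List Int) (out : List Int × List Int) : Prop := out = bottles_dp_alt v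
instance (v : List Int) (out : List Int × List Int) : Decidable (Spec_bottles_dp v out) := by unfold Spec_bottles_dp; infer_instance

-- ===== CLAIM (what is proved, stated in full; the proofs are below) =====
def Claim_equal_bottles_dp : Prop := ∀ (v : List Int), Dom_bottles_dp v → Spec_bottles_dp v (bottles_dp v)

-- ===== LEMMAS AND PROOFS =====

-- the inner vol_add loop of A builds exactly the list of x + sv[j]
lemma inner_foldl (l : List Int) (sv : List Int) (x : Int) (acc : List Int) :
    l.foldl
      (fun (st2 : Int × List Int) j =>
        ((st2.1 + PySem.List.pyGetD sv j 0) - PySem.List.pyGetD sv j 0,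
         st2.2 ++ [st2.1 + PySem.List.pyGetD sv j 0])) (x, acc)
    = (x, acc ++ l.map (fun j => x + PySem.List.pyGetD sv j 0)) := by
  induction l generalizing acc with
  | nil => simp
  | cons h t ih =>
    simp only [List.foldl_cons, add_sub_cancel_right] at ih ⊢
    rw [ih]; simp

-- xs[j] ignores a trailing element when j indexes inside the prefix
lemma pyGetD_concat_lt (w : List Int) (p : Int) (j : Int) (h0 : 0 ≤ j) (h : j < (w.length : Int)) :
    PySem.List.pyGetD (w ++ [p]) j 0 = PySem.List.pyGetD w j 0 := by
  rw [PySem.List.pyGetD_eq_getElem (w ++ [p]) 0 h0 (by simp; omega),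
      PySem.List.pyGetD_eq_getElem w 0 h0 h]
  exact List.getElem_append_left (by omega)

-- xs[len w] of w ++ [p] is p
lemma pyGetD_concat_self (w : List Int) (p : Int) :
    PySem.List.pyGetD (w ++ [p]) (w.length : Int) 0 = p := by
  rw [PySem.List.pyGetD_eq_getElem (w ++ [p]) 0 (by omega) (by simp)]
  simp

-- A's compare list is x + each element of the sv prefix
lemma compare_eq (w : List Int) (p x : Int) :
    (PySem.List.pyRange 0 (w.length : Int) 1).map (fun j => x + PySem.List.pyGetD (w ++ [p]) j 0)
      = w.map (fun s => x + s) := by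
  have h1 : (PySem.List.pyRange 0 (w.length : Int) 1).map (fun j => x + PySem.List.pyGetD (w ++ [p]) j 0)
      = (PySem.List.pyRange 0 (w.length : Int) 1).map (fun j => x + PySem.List.pyGetD w j 0) := by
    apply List.map_congr_left
    intro j hj
    rw [PySem.List.mem_pyRange_one] at hj
    rw [pyGetD_concat_lt w p j hj.1 hj.2]
  rw [h1]
  have h2 : (fun j => x + PySem.List.pyGetD w j 0)
      = (fun s => x + s) ∘ (fun j => PySem.List.pyGetD w j 0) := rfl
  rw [h2, ← List.map_map, PySem.List.map_pyGetD_pyRange_zero']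

-- compare[compare.index(max(compare))] = max(compare) = x + p2 when every prefix value is ≤ p2
lemma citem_eq (w : List Int) (x p2 : Int) (hw : ∀ y ∈ w, y ≤ p2) (hmem : p2 ∈ w) :
    PySem.List.pyGetD (w.map (fun s => x + s))
      (((PySem.List.index? (w.map (fun s => x + s))
          ((PySem.List.max? (w.map (fun s => x + s)) (fun y => y)).getD 0)).getD 0 : Nat) : Int) 0
      = x + p2 := by
  set compare := w.map (fun s => x + s) with hc
  have hwne : w ≠ [] := by rintro rfl; simp at hmem
  have hne : compare ≠ [] := by simp [hc, hwne]
  obtain ⟨m, hm⟩ : ∃ m, PySem.List.max? compare (fun y => y) = some m := by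
    cases h : PySem.List.max? compare (fun y => y) with
    | none => exact absurd ((PySem.List.max?_eq_none_iff _ _).mp h) hne
    | some m => exact ⟨m, rfl⟩
  have hmmem : m ∈ compare := PySem.List.max?_mem hm
  have hmax : ∀ y ∈ compare, y ≤ m := PySem.List.max?_isMax hm
  have hmval : m = x + p2 := by
    have h1 : m ≤ x + p2 := by
      obtain ⟨s, hs, rfl⟩ := List.mem_map.mp hmmem
      have := hw s hs; omega
    have h2 : x + p2 ≤ m := hmax _ (List.mem_map.mpr ⟨p2, hmem, rfl⟩)
    omega
  obtain ⟨k0, hk0⟩ : ∃ k0, PySem.List.index? compare m = some k0 := by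
    cases h : PySem.List.index? compare m with
    | none => exact absurd hmmem ((PySem.List.index?_eq_none_iff _ _).mp h)
    | some k0 => exact ⟨k0, rfl⟩
  obtain ⟨hk0lt, hk0v, -⟩ := PySem.List.getElem_of_index?_eq_some hk0
  rw [hm]
  simp only [Option.getD_some]
  rw [← hmval, hk0, Option.getD_some, PySem.List.pyGetD_natCast, List.getD_eq_getElem _ _ hk0lt,
      hk0v, hmval]

-- the invariant tying A's state to B's state after processing indices 0..k-1
def InvAB (v : List Int) (a c b1 : Int) (k : Nat) : Prop :=
  ∃ sv₀ p2 p bv,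
    (PySem.List.pyRange 0 (k : Int) 1).foldl (aStep v) ([], []) = (sv₀ ++ [p2, p], bv) ∧
    (PySem.List.pyRange 2 (k : Int) 1).foldl (altStep v) (([a, c], [0, b1]), (a, c))
      = ((sv₀ ++ [p2, p], bv), (p2, p)) ∧
    (sv₀ ++ [p2, p]).length = k ∧ (∀ y ∈ sv₀, y ≤ p2) ∧ p2 ≤ p

lemma inv_step (v : List Int) (a c b1 : Int) (k : Nat) (hk : 2 ≤ k)
    (h : InvAB v a c b1 k) : InvAB v a c b1 (k + 1) := by
  obtain ⟨sv₀, p2, p, bv, hA, hB, hlen, hle, hp⟩ := h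
  have hrA : PySem.List.pyRange 0 ((k : Int) + 1) 1
      = PySem.List.pyRange 0 (k : Int) 1 ++ [(k : Int)] :=
    PySem.List.pyRange_one_succ_right (by omega)
  have hrB : PySem.List.pyRange 2 ((k : Int) + 1) 1
      = PySem.List.pyRange 2 (k : Int) 1 ++ [(k : Int)] :=
    PySem.List.pyRange_one_succ_right (by exact_mod_cast hk)
  have hlen' : sv₀.length + 2 = k := by simpa using hlen
  set x := PySem.List.pyGetD v (k : Int) 0 with hx
  set w := sv₀ ++ [p2] with hwdef
  have hwlen : (w.length : Int) = (sv₀.length : Int) + 1 := by simp [hwdef]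
  have hsv : sv₀ ++ [p2, p] = w ++ [p] := by simp [hwdef]
  have hwle : ∀ y ∈ w, y ≤ p2 := by
    intro y hy
    rcases List.mem_append.mp hy with h | h
    · exact hle y h
    · simp at h; omega
  -- evaluate A's step at index k
  have hstepA : aStep v (sv₀ ++ [p2, p], bv) (k : Int)
      = if x + p2 > p then (sv₀ ++ [p2, p] ++ [x + p2], bv ++ [(k : Int)])
        else (sv₀ ++ [p2, p] ++ [p], bv ++ [-1]) := by
    rw [aStep]
    simp only [show ¬((k : Int) = 0) by omega, show ¬((k : Int) = 1) by omega, if_false]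
    rw [inner_foldl]
    simp only [List.nil_append]
    have hub : ((sv₀ ++ [p2, p]).length : Int) - 1 = (w.length : Int) := by
      simp [hwdef]; omega
    rw [hub, hsv, compare_eq w p x]
    rw [citem_eq w x p2 hwle (by simp [hwdef])]
    have hlast : PySem.List.pyGetD (w ++ [p]) ((k : Int) - 1) 0 = p := by
      have hkl : ((k : Int) - 1) = (w.length : Int) := by rw [hwlen]; omega
      rw [hkl, pyGetD_concat_self]
    rw [hlast]
  -- evaluate B's step at index k
  have hstepB : altStep v ((sv₀ ++ [p2, p], bv), (p2, p)) (k : Int)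
      = if x + p2 > p then ((sv₀ ++ [p2, p] ++ [x + p2], bv ++ [(k : Int)]), (p, x + p2))
        else ((sv₀ ++ [p2, p] ++ [p], bv ++ [-1]), (p, p)) := by
    rw [altStep]
  have hwle' : ∀ y ∈ w, y ≤ p := fun y hy => le_trans (hwle y hy) hp
  by_cases hcmp : x + p2 > p
  · refine ⟨w, p, x + p2, bv ++ [(k : Int)], ?_, ?_, ?_, hwle', by omega⟩
    · push_cast
      rw [hrA, List.foldl_append, hA]
      simp only [List.foldl_cons, List.foldl_nil]
      rw [hstepA, if_pos hcmp, hsv]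
      simp
    · push_cast
      rw [hrB, List.foldl_append, hB]
      simp only [List.foldl_cons, List.foldl_nil]
      rw [hstepB, if_pos hcmp, hsv]
      simp
    · simp [hwdef]; omega
  · refine ⟨w, p, p, bv ++ [-1], ?_, ?_, ?_, hwle', le_refl p⟩
    · push_cast
      rw [hrA, List.foldl_append, hA]
      simp only [List.foldl_cons, List.foldl_nil]
      rw [hstepA, if_neg hcmp, hsv]
      simp
    · push_cast
      rw [hrB, List.foldl_append, hB]
      simp only [List.foldl_cons, List.foldl_nil]
      rw [hstepB, if_neg hcmp, hsv]
      simp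
    · simp [hwdef]; omega

lemma inv_base (a b : Int) (t : List Int) :
    InvAB (a :: b :: t) a (if b > a then b else a) (if b > a then 1 else -1) 2 := by
  have h0 : PySem.List.pyGetD (a :: b :: t) 0 0 = a := by
    rw [PySem.List.pyGetD_eq_getElem _ 0 (by omega) (by simp only [List.length_cons]; push_cast; omega)]; simp
  have h1 : PySem.List.pyGetD (a :: b :: t) 1 0 = b := by
    rw [PySem.List.pyGetD_eq_getElem _ 0 (by omega) (by simp only [List.length_cons]; push_cast; omega)]; simp
  have ha0 : PySem.List.pyGetD [a] (0 : Int) 0 = a := by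
    rw [PySem.List.pyGetD_eq_getElem _ 0 (by omega) (by norm_num)]; simp
  refine ⟨[], a, if b > a then b else a, [0, if b > a then 1 else -1], ?_, ?_, by simp, by simp, ?_⟩
  · have hr : PySem.List.pyRange 0 ((2 : Nat) : Int) 1 = [0, 1] := by decide
    rw [hr]
    simp only [List.foldl_cons, List.foldl_nil]
    by_cases hba : b > a <;>
      simp [aStep, h0, h1, ha0, hba]
  · have hr : PySem.List.pyRange 2 ((2 : Nat) : Int) 1 = [] := by decide
    rw [hr]; simp
  · split <;> omega

lemma inv_all (a b : Int) (t : List Int) (j : Nat) :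
    InvAB (a :: b :: t) a (if b > a then b else a) (if b > a then 1 else -1) (2 + j) := by
  induction j with
  | zero => exact inv_base a b t
  | succ j ih => exact inv_step _ _ _ _ (2 + j) (by omega) ih

theorem bottles_dp_spec : Claim_equal_bottles_dp := by
  unfold Claim_equal_bottles_dp Spec_bottles_dp
  intro v _
  match v with
  | [] =>
    simp [bottles_dp, bottles_dp_alt, PySem.List.pyRange_one_eq_nil]
  | [a] =>
    have hr : PySem.List.pyRange 0 1 1 = [0] := by decide
    have h0 : PySem.List.pyGetD [a] (0 : Int) 0 = a := by
      rw [PySem.List.pyGetD_eq_getElem _ 0 (by omega) (by simp)]; simp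
    simp [bottles_dp, bottles_dp_alt, hr, aStep, h0]
  | a :: b :: t =>
    obtain ⟨sv₀, p2, p, bv, hA, hB, -, -, -⟩ := inv_all a b t t.length
    have hn : ((2 + t.length : Nat) : Int) = ((a :: b :: t).length : Int) := by
      simp; omega
    rw [hn] at hA hB
    simp only [bottles_dp, bottles_dp_alt]
    rw [hA, hB]
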